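-- pv_equiv track=rewrite | github.com/Robert-Vardanyan/PythonMarathon365 | day118/day118.py | update_sunk_and_marks
-- ===== SOURCE A (Python) =====
-- GRID_SIZE = 10
--
-- EMPTY = 0
--
-- MISS = 2
--
-- HIT = 3
--
-- SUNK = 4  # Добавим состояние для потопленных клеток (квадраты)
--
-- def mark_around_cells(ship_cells):
--     # Возвращает список ячеек вокруг корабля (в том числе диагонали), где кораблей быть не может
--     around = set()
--     for (r, c) in ship_cells:
--         for dr in [-1, 0, 1]:
--             for dc in [-1, 0, 1]:
--                 rr, cc = r + dr, c + dc
--                 if 0 <= rr < GRID_SIZE and 0 <= cc < GRID_SIZE and (rr, cc) not in ship_cells: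
--                     around.add((rr, cc))
--     return around
--
-- def update_sunk_and_marks(board, hits_board, ships):
--     sunk_ships = []
--     mark_around_sunk = [[None]*GRID_SIZE for _ in range(GRID_SIZE)]
--
--     for ship in ships:
--         if all(hits_board[r][c] == HIT for r,c in ship):
--             sunk_ships.append(ship)
--             for r,c in ship:
--                 hits_board[r][c] = SUNK
--             # Помечаем вокруг корабля белыми точками
--             around = mark_around_cells(ship)
--             for rr, cc in around:
--                 if hits_board[rr][cc] == EMPTY:
--                     mark_around_sunk[rr][cc] = MISS
--     return sunk_ships, mark_around_sunk
-- ===== SOURCE B (Python) =====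
-- GRID_SIZE = 10
--
-- EMPTY = 0
--
-- MISS = 2
--
-- HIT = 3
--
-- SUNK = 4
--
-- def update_sunk_and_marks(board, hits_board, ships):
--     # Pass 1: detect sunk ships, stamping SUNK as we go so overlapping
--     # ships are judged exactly as in sequential processing.
--     sunk_ships = []
--     for ship in ships:
--         if all(hits_board[r][c] == HIT for r, c in ship):
--             sunk_ships.append(ship)
--             for r, c in ship:
--                 hits_board[r][c] = SUNK
--     # Pass 2: one scan of the 10x10 mark grid; a cell gets MISS iff it is
--     # adjacent to (but not part of) some sunk ship and is EMPTY.
--     def ringed(rr, cc):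
--         return any((rr, cc) not in ship
--                    and any(abs(rr - r) <= 1 and abs(cc - c) <= 1 for r, c in ship)
--                    for ship in sunk_ships)
--     mark_around_sunk = [[MISS if ringed(rr, cc) and hits_board[rr][cc] == EMPTY else None
--                          for cc in range(GRID_SIZE)]
--                         for rr in range(GRID_SIZE)]
--     return sunk_ships, mark_around_sunk
-- ===== Notes on version B (the rewrite author's own statement) =====
-- stated objective: alternative
-- what changed: B splits the work into two passes: detection first (stamping SUNK), then the MISS marks are produced by a single scan of the fixed 10x10 mark grid testing each cell for adjacency to a collected sunk ship, instead of building and iterating a per-ship neighborhood set interleaved with detection.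
import Mathlib
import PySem

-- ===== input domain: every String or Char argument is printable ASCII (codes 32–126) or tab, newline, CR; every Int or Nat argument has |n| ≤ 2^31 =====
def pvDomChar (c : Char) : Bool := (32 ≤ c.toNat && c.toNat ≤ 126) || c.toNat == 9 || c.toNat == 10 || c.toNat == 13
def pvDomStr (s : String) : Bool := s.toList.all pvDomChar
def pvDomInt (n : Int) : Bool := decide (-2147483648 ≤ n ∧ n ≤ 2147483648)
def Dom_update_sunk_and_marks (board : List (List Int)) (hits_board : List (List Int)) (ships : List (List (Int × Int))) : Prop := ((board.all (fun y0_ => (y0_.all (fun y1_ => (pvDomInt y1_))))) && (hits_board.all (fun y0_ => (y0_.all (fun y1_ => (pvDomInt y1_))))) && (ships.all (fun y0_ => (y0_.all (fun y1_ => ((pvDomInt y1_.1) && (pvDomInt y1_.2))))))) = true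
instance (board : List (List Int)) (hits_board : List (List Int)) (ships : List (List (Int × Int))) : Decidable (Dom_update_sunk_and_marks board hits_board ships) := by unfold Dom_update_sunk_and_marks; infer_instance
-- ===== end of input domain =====

-- B: two passes — sunk-ship detection (stamping SUNK) first, then one scan of the 10×10 mark
-- grid testing adjacency to the collected sunk ships, instead of per-ship neighborhood sets
-- interleaved with detection (alternative decomposition, similar cost; equivalence is about
-- the RETURN value — both Pythons mutate hits_board identically).


-- ===== PORT A =====
-- shared 2-D grid indexing: Python's g[r][c] read and g[r][c] = v write (total via the PySem
-- defaulted primitives; exact on Pre_, where every such access is in range)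
def hget (g : List (List Int)) (r c : Int) : Int :=
  PySem.List.pyGetD (PySem.List.pyGetD g r []) c 0

def hset (g : List (List Int)) (r c : Int) (v : Int) : List (List Int) :=
  PySem.List.pySetD g r (PySem.List.pySetD (PySem.List.pyGetD g r []) c v)

def mset (g : List (List (Option Int))) (r c : Int) (v : Option Int) : List (List (Option Int)) :=
  PySem.List.pySetD g r (PySem.List.pySetD (PySem.List.pyGetD g r []) c v)

-- Python's mark_around_cells: the set built by the triple loop (it is consumed below only
-- order-independently — idempotent writes — so modelling the set in insertion order is exact)
def mark_around_cells (ship_cells : List (Int × Int)) : PySem.Set (Int × Int) :=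
  ship_cells.foldl (fun around rc =>
    (([-1, 0, 1] : List Int).foldl (fun around dr =>
      (([-1, 0, 1] : List Int).foldl (fun around dc =>
        if 0 ≤ rc.1 + dr ∧ rc.1 + dr < 10 ∧ 0 ≤ rc.2 + dc ∧ rc.2 + dc < 10 ∧
            (rc.1 + dr, rc.2 + dc) ∉ ship_cells then
          PySem.Set.add around (rc.1 + dr, rc.2 + dc)
        else around) around)) around)) PySem.Set.empty

-- body of A's single `for ship in ships` loop: state = (sunk_ships, hits_board, mark_around_sunk)
def astep (st : (List (List (Int × Int))) × (List (List Int)) × (List (List (Option Int))))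
    (ship : List (Int × Int)) :
    (List (List (Int × Int))) × (List (List Int)) × (List (List (Option Int))) :=
  if ship.all (fun rc => hget st.2.1 rc.1 rc.2 == 3) then
    let hb2 := ship.foldl (fun hb rc => hset hb rc.1 rc.2 4) st.2.1
    let mk2 := (mark_around_cells ship).foldl (fun mk rc =>
        if hget hb2 rc.1 rc.2 == 0 then mset mk rc.1 rc.2 (some 2) else mk) st.2.2
    (st.1 ++ [ship], hb2, mk2)
  else st

def update_sunk_and_marks (board : List (List Int)) (hits_board : List (List Int)) (ships : List (List (Int × Int))) : (List (List (Int × Int))) × List (List (Option Int)) :=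
  let init : List (List (Option Int)) :=
    (PySem.List.pyRange 0 10 1).map (fun _ => List.replicate 10 none)
  let st := ships.foldl astep (([] : List (List (Int × Int))), hits_board, init)
  (st.1, st.2.2)

-- ===== PORT B =====
-- body of B's pass-1 detection loop: state = (sunk_ships, hits_board)
def bstep (st : (List (List (Int × Int))) × (List (List Int))) (ship : List (Int × Int)) :
    (List (List (Int × Int))) × (List (List Int)) :=
  if ship.all (fun rc => hget st.2 rc.1 rc.2 == 3) then
    (st.1 ++ [ship], ship.foldl (fun hb rc => hset hb rc.1 rc.2 4) st.2)
  else st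

-- Source B's nested helper `ringed`
def ringedB (sunk : List (List (Int × Int))) (rr cc : Int) : Bool :=
  sunk.any (fun ship =>
    decide ((rr, cc) ∉ ship) &&
    ship.any (fun rc => decide (|rr - rc.1| ≤ 1 ∧ |cc - rc.2| ≤ 1)))

def update_sunk_and_marks_alt (board : List (List Int)) (hits_board : List (List Int)) (ships : List (List (Int × Int))) : (List (List (Int × Int))) × List (List (Option Int)) :=
  let det := ships.foldl bstep (([] : List (List (Int × Int))), hits_board)
  let mark := (PySem.List.pyRange 0 10 1).map (fun rr =>
    (PySem.List.pyRange 0 10 1).map (fun cc =>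
      if ringedB det.1 rr cc && (hget det.2 rr cc == 0) then some (2 : Int) else none))
  (det.1, mark)

-- ===== PRECONDITION & SPEC =====
-- Pre_ excludes inputs where a ship cell, or an in-grid 3×3 neighbor of a ship cell, indexes
-- outside hits_board: there A raises IndexError whenever that ship sinks, and when it does not
-- sink A returns (only thanks to short-circuiting) the same value B returns (see the cite).
def Pre_update_sunk_and_marks (board : List (List Int)) (hits_board : List (List Int)) (ships : List (List (Int × Int))) : Prop :=
  ∀ ship ∈ ships, ∀ rc ∈ ship,
    (PySem.Raise.InRange hits_board.length rc.1 ∧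
     PySem.Raise.InRange (PySem.List.pyGetD hits_board rc.1 []).length rc.2) ∧
    ∀ d ∈ ([-1, 0, 1] : List Int), ∀ e ∈ ([-1, 0, 1] : List Int),
      (0 ≤ rc.1 + d ∧ rc.1 + d < 10 ∧ 0 ≤ rc.2 + e ∧ rc.2 + e < 10 ∧
        (rc.1 + d, rc.2 + e) ∉ ship) →
      (rc.1 + d < hits_board.length ∧
       rc.2 + e < (PySem.List.pyGetD hits_board (rc.1 + d) []).length)

instance (board : List (List Int)) (hits_board : List (List Int)) (ships : List (List (Int × Int))) : Decidable (Pre_update_sunk_and_marks board hits_board ships) := by unfold Pre_update_sunk_and_marks; infer_instance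

def pvWitness_update_sunk_and_marks : List (List Int) × List (List Int) × (List (List (Int × Int))) :=
  ([], [[3, 0], [0, 0]], [[(0, 0)]])

def Spec_update_sunk_and_marks (board : List (List Int)) (hits_board : List (List Int)) (ships : List (List (Int × Int))) (out : (List (List (Int × Int))) × List (List (Option Int))) : Prop := out = update_sunk_and_marks_alt board hits_board ships
instance (board : List (List Int)) (hits_board : List (List Int)) (ships : List (List (Int × Int))) (out : (List (List (Int × Int))) × List (List (Option Int))) : Decidable (Spec_update_sunk_and_marks board hits_board ships out) := by unfold Spec_update_sunk_and_marks; infer_instance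

-- ===== CLAIM (what is proved, stated in full; the proofs are below) =====
def Claim_equal_update_sunk_and_marks : Prop := ∀ (board : List (List Int)) (hits_board : List (List Int)) (ships : List (List (Int × Int))), Dom_update_sunk_and_marks board hits_board ships → Pre_update_sunk_and_marks board hits_board ships → Spec_update_sunk_and_marks board hits_board ships (update_sunk_and_marks board hits_board ships)

-- ===== LEMMAS AND PROOFS =====
-- The equality in fact holds unconditionally for the (totalized) ports; Pre_ is needed only
-- for faithfulness of the ports to the Pythons (outside it A raises).

-- a 10×10 grid described by a function on coordinates
def conc (m : Int → Int → Option Int) : List (List (Option Int)) :=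
  (PySem.List.pyRange 0 10 1).map (fun a => (PySem.List.pyRange 0 10 1).map (m a))

-- the invariant carried through A's single pass: the mark grid so far is exactly
-- "MISS where some already-sunk ship rings the cell and the cell is EMPTY"
def inv (sunk : List (List (Int × Int))) (hb : List (List Int)) : Int → Int → Option Int :=
  fun a b => if (0 ≤ a ∧ a < 10 ∧ 0 ≤ b ∧ b < 10) ∧ ringedB sunk a b = true ∧ hget hb a b = 0
    then some 2 else none

lemma pyIdx_lt (n : Nat) (i : Int) (k : Nat) (h : PySem.List.pyIdx? n i = some k) : k < n := by
  unfold PySem.List.pyIdx? at h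
  split_ifs at h with h0 h1 h2 <;> simp_all <;> omega

lemma pyGetD_idx {α : Type} (xs : List α) (i : Int) (d : α) (k : Nat)
    (h : PySem.List.pyIdx? xs.length i = some k) :
    PySem.List.pyGetD xs i d = xs[k]'(pyIdx_lt _ _ _ h) := by
  have hk := pyIdx_lt _ _ _ h
  simp [PySem.List.pyGetD, PySem.List.pyGet?, h, List.getElem?_eq_getElem hk]

lemma pyGetD_pySetD_cases {α : Type} (xs : List α) (i : Int) (v : α) (j : Int) (d : α) :
    PySem.List.pyGetD (PySem.List.pySetD xs i v) j d = PySem.List.pyGetD xs j d ∨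
    (PySem.List.pyGetD (PySem.List.pySetD xs i v) j d = v ∧
     PySem.List.pyGetD xs j d = PySem.List.pyGetD xs i d) := by
  rcases h : PySem.List.pyIdx? xs.length i with _ | k
  · left
    simp [PySem.List.pySetD, PySem.List.pySet?, h]
  · have hk := pyIdx_lt _ _ _ h
    have hset : PySem.List.pySetD xs i v = xs.set k v := by
      simp [PySem.List.pySetD, PySem.List.pySet?, h]
    rw [hset]
    rcases hj : PySem.List.pyIdx? xs.length j with _ | k'
    · left
      simp [PySem.List.pyGetD, PySem.List.pyGet?, hj]
    · have hj' : PySem.List.pyIdx? (xs.set k v).length j = some k' := by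
        simpa [List.length_set] using hj
      rw [pyGetD_idx _ _ _ _ hj', pyGetD_idx _ _ _ _ hj, pyGetD_idx _ _ _ _ h]
      by_cases hkk : k' = k
      · right
        subst hkk
        simp
      · left
        simp [Ne.symm hkk]

lemma hget_hset_cases (g : List (List Int)) (r c v a b : Int) :
    hget (hset g r c v) a b = hget g a b ∨
    (hget (hset g r c v) a b = v ∧ hget g a b = hget g r c) := by
  unfold hget hset
  rcases pyGetD_pySetD_cases g r (PySem.List.pySetD (PySem.List.pyGetD g r []) c v) a
      ([] : List Int) with h1 | ⟨h1, h2⟩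
  · left
    rw [h1]
  · rw [h1, h2]
    rcases pyGetD_pySetD_cases (PySem.List.pyGetD g r []) c v b 0 with h3 | ⟨h3, h4⟩
    · left
      rw [h3]
    · right
      exact ⟨h3, h4⟩

lemma hget_hset_zero (g : List (List Int)) (r c a b : Int) (h : hget g r c ≠ 0) :
    (hget (hset g r c 4) a b = 0 ↔ hget g a b = 0) := by
  rcases hget_hset_cases g r c 4 a b with h1 | ⟨h1, h2⟩
  · rw [h1]
  · rw [h1, h2]
    constructor <;> intro hx
    · omega
    · exact absurd hx h

lemma writes_zero (cells : List (Int × Int)) :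
    ∀ (g : List (List Int)), (∀ rc ∈ cells, hget g rc.1 rc.2 ≠ 0) →
    ∀ a b, (hget (cells.foldl (fun hb rc => hset hb rc.1 rc.2 4) g) a b = 0 ↔ hget g a b = 0) := by
  induction cells with
  | nil => intro g _ a b; simp
  | cons rc tl ih =>
    intro g hg a b
    have hrc : hget g rc.1 rc.2 ≠ 0 := hg rc (by simp)
    have hstep := hget_hset_zero g rc.1 rc.2
    have htl : ∀ rc' ∈ tl, hget (hset g rc.1 rc.2 4) rc'.1 rc'.2 ≠ 0 := by
      intro rc' h' h0
      exact hg rc' (by simp [h']) ((hstep rc'.1 rc'.2 hrc).mp h0)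
    simp only [List.foldl_cons]
    rw [ih (hset g rc.1 rc.2 4) htl a b, hstep a b hrc]

lemma mem_condAdd (s : PySem.Set (Int × Int)) (x p : Int × Int) (C : Prop) [Decidable C] :
    (p ∈ (if C then PySem.Set.add s x else s)) ↔ ((C ∧ p = x) ∨ p ∈ s) := by
  split_ifs with h
  · rw [PySem.Set.mem_add]
    tauto
  · tauto

lemma mem_fold_dc (ship : List (Int × Int)) (rc : Int × Int) (dr : Int) (ds : List Int) :
    ∀ (s : PySem.Set (Int × Int)) (p : Int × Int),
    (p ∈ ds.foldl (fun around dc =>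
        if 0 ≤ rc.1 + dr ∧ rc.1 + dr < 10 ∧ 0 ≤ rc.2 + dc ∧ rc.2 + dc < 10 ∧
            (rc.1 + dr, rc.2 + dc) ∉ ship then
          PySem.Set.add around (rc.1 + dr, rc.2 + dc)
        else around) s) ↔
      (p ∈ s ∨ ∃ dc ∈ ds, (0 ≤ rc.1 + dr ∧ rc.1 + dr < 10 ∧ 0 ≤ rc.2 + dc ∧ rc.2 + dc < 10 ∧
          (rc.1 + dr, rc.2 + dc) ∉ ship) ∧ p = (rc.1 + dr, rc.2 + dc)) := by
  induction ds with
  | nil => simp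
  | cons d tl ih =>
    intro s p
    rw [List.foldl_cons, ih, mem_condAdd]
    simp only [List.mem_cons]
    constructor
    · rintro ((⟨hc, rfl⟩ | h) | ⟨dc, hdc, hc, rfl⟩)
      · exact Or.inr ⟨d, Or.inl rfl, hc, rfl⟩
      · tauto
      · exact Or.inr ⟨dc, Or.inr hdc, hc, rfl⟩
    · rintro (h | ⟨dc, hdc, hc, rfl⟩)
      · tauto
      · rcases hdc with rfl | hdc
        · exact Or.inl (Or.inl ⟨hc, rfl⟩)
        · exact Or.inr ⟨dc, hdc, hc, rfl⟩

lemma mem_fold_dr (ship : List (Int × Int)) (rc : Int × Int) (ds : List Int) :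
    ∀ (s : PySem.Set (Int × Int)) (p : Int × Int),
    (p ∈ ds.foldl (fun around dr =>
        (([-1, 0, 1] : List Int).foldl (fun around dc =>
          if 0 ≤ rc.1 + dr ∧ rc.1 + dr < 10 ∧ 0 ≤ rc.2 + dc ∧ rc.2 + dc < 10 ∧
              (rc.1 + dr, rc.2 + dc) ∉ ship then
            PySem.Set.add around (rc.1 + dr, rc.2 + dc)
          else around) around)) s) ↔
      (p ∈ s ∨ ∃ dr ∈ ds, ∃ dc ∈ ([-1, 0, 1] : List Int),
        (0 ≤ rc.1 + dr ∧ rc.1 + dr < 10 ∧ 0 ≤ rc.2 + dc ∧ rc.2 + dc < 10 ∧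
          (rc.1 + dr, rc.2 + dc) ∉ ship) ∧ p = (rc.1 + dr, rc.2 + dc)) := by
  induction ds with
  | nil => simp
  | cons d tl ih =>
    intro s p
    rw [List.foldl_cons, ih, mem_fold_dc]
    simp only [List.mem_cons]
    constructor
    · rintro ((h | ⟨dc, hdc, hc, rfl⟩) | ⟨dr, hdr, dc, hdc, hc, rfl⟩)
      · tauto
      · exact Or.inr ⟨d, Or.inl rfl, dc, hdc, hc, rfl⟩
      · exact Or.inr ⟨dr, Or.inr hdr, dc, hdc, hc, rfl⟩
    · rintro (h | ⟨dr, hdr, dc, hdc, hc, rfl⟩)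
      · tauto
      · rcases hdr with rfl | hdr
        · exact Or.inl (Or.inr ⟨dc, hdc, hc, rfl⟩)
        · exact Or.inr ⟨dr, hdr, dc, hdc, hc, rfl⟩

lemma mem_mark_fold (ship : List (Int × Int)) (cells : List (Int × Int)) :
    ∀ (s : PySem.Set (Int × Int)) (p : Int × Int),
    (p ∈ cells.foldl (fun around rc =>
        (([-1, 0, 1] : List Int).foldl (fun around dr =>
          (([-1, 0, 1] : List Int).foldl (fun around dc =>
            if 0 ≤ rc.1 + dr ∧ rc.1 + dr < 10 ∧ 0 ≤ rc.2 + dc ∧ rc.2 + dc < 10 ∧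
                (rc.1 + dr, rc.2 + dc) ∉ ship then
              PySem.Set.add around (rc.1 + dr, rc.2 + dc)
            else around) around)) around)) s) ↔
      (p ∈ s ∨ ∃ rc ∈ cells, ∃ dr ∈ ([-1, 0, 1] : List Int), ∃ dc ∈ ([-1, 0, 1] : List Int),
        (0 ≤ rc.1 + dr ∧ rc.1 + dr < 10 ∧ 0 ≤ rc.2 + dc ∧ rc.2 + dc < 10 ∧
          (rc.1 + dr, rc.2 + dc) ∉ ship) ∧ p = (rc.1 + dr, rc.2 + dc)) := by
  induction cells with
  | nil => simp
  | cons rc tl ih =>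
    intro s p
    rw [List.foldl_cons, ih, mem_fold_dr]
    simp only [List.mem_cons]
    constructor
    · rintro (h | h)
      · rcases h with h | ⟨dr, hdr, dc, hdc, hc, rfl⟩
        · tauto
        · exact Or.inr ⟨rc, Or.inl rfl, dr, hdr, dc, hdc, hc, rfl⟩
      · rcases h with ⟨rc', hrc', rest⟩
        exact Or.inr ⟨rc', Or.inr hrc', rest⟩
    · rintro (h | ⟨rc', hrc', rest⟩)
      · tauto
      · rcases hrc' with rfl | hrc'
        · exact Or.inl (Or.inr rest)
        · exact Or.inr ⟨rc', hrc', rest⟩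

lemma mem_mark_around (ship : List (Int × Int)) (p : Int × Int) :
    p ∈ mark_around_cells ship ↔
      (0 ≤ p.1 ∧ p.1 < 10 ∧ 0 ≤ p.2 ∧ p.2 < 10 ∧ p ∉ ship ∧
        ∃ rc ∈ ship, |p.1 - rc.1| ≤ 1 ∧ |p.2 - rc.2| ≤ 1) := by
  unfold mark_around_cells
  rw [mem_mark_fold]
  simp only [PySem.Set.empty]
  constructor
  · rintro (h | ⟨rc, hrc, dr, hdr, dc, hdc, ⟨h1, h2, h3, h4, h5⟩, rfl⟩)
    · simp at h
    · have hdr' : dr = -1 ∨ dr = 0 ∨ dr = 1 := by simpa using hdr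
      have hdc' : dc = -1 ∨ dc = 0 ∨ dc = 1 := by simpa using hdc
      refine ⟨h1, h2, h3, h4, h5, rc, hrc, ?_, ?_⟩
      · rw [show ((rc.1 + dr, rc.2 + dc).1) = rc.1 + dr from rfl, abs_le]
        omega
      · rw [show ((rc.1 + dr, rc.2 + dc).2) = rc.2 + dc from rfl, abs_le]
        omega
  · rintro ⟨h1, h2, h3, h4, h5, rc, hrc, ha, hb⟩
    right
    refine ⟨rc, hrc, p.1 - rc.1, ?_, p.2 - rc.2, ?_, ?_, ?_⟩
    · simp only [abs_le] at ha
      simp only [List.mem_cons]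
      omega
    · simp only [abs_le] at hb
      simp only [List.mem_cons]
      omega
    · constructor
      · omega
      · refine ⟨by omega, by omega, by omega, ?_⟩
        simpa using h5
    · simp

lemma pySetD_map_pyRange {α : Type} (f : Int → α) (c : Int) (v : α)
    (hc0 : 0 ≤ c) (hc1 : c < 10) :
    PySem.List.pySetD ((PySem.List.pyRange 0 10 1).map f) c v =
      (PySem.List.pyRange 0 10 1).map (fun j => if j = c then v else f j) := by
  rw [PySem.List.pySetD_of_nonneg _ _ hc0]
  apply List.ext_getElem
  · simp
  · intro k h1 h2
    rw [List.getElem_set]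
    simp only [List.getElem_map]
    have hlen : k < (PySem.List.pyRange 0 10 1).length := by
      simpa using h2
    rw [PySem.List.getElem_pyRange_one 0 10 k (by simpa using hlen)]
    split_ifs <;> first | rfl | omega

lemma mset_conc (m : Int → Int → Option Int) (r c : Int) (v : Option Int)
    (hr0 : 0 ≤ r) (hr1 : r < 10) (hc0 : 0 ≤ c) (hc1 : c < 10) :
    mset (conc m) r c v = conc (fun a b => if a = r ∧ b = c then v else m a b) := by
  unfold mset conc
  rw [PySem.List.pyGetD_map_pyRange_of_nonneg _ _ _ _ hr0 hr1]
  rw [pySetD_map_pyRange _ _ _ hc0 hc1]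
  rw [pySetD_map_pyRange _ _ _ hr0 hr1]
  apply List.map_congr_left
  intro a _
  by_cases ha : a = r
  · subst ha
    rw [if_pos rfl]
    apply List.map_congr_left
    intro b _
    by_cases hb : b = c <;> simp [hb]
  · simp only [if_neg ha]
    apply List.map_congr_left
    intro b _
    simp [ha]

lemma markfold_conc (L : List (Int × Int)) :
    ∀ (m : Int → Int → Option Int) (hb : List (List Int)),
    (∀ p ∈ L, 0 ≤ p.1 ∧ p.1 < 10 ∧ 0 ≤ p.2 ∧ p.2 < 10) →
    L.foldl (fun mk rc => if hget hb rc.1 rc.2 == 0 then mset mk rc.1 rc.2 (some 2) else mk)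
        (conc m) =
      conc (fun a b => if (a, b) ∈ L ∧ hget hb a b = 0 then some 2 else m a b) := by
  induction L with
  | nil =>
    intro m hb _
    simp only [List.foldl_nil]
    have he : (fun a b => if (a, b) ∈ ([] : List (Int × Int)) ∧ hget hb a b = 0
        then some (2 : Int) else m a b) = m := by
      funext a b
      simp
    rw [he]
  | cons rc tl ih =>
    intro m hb hbd
    have hbounds := hbd rc (by simp)
    rw [List.foldl_cons]
    by_cases hrc : hget hb rc.1 rc.2 = 0
    · rw [if_pos (by simpa using hrc)]
      rw [mset_conc m rc.1 rc.2 _ hbounds.1 hbounds.2.1 hbounds.2.2.1 hbounds.2.2.2]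
      rw [ih _ hb (fun p hp => hbd p (by simp [hp]))]
      congr 1
      funext a b
      by_cases hab : a = rc.1 ∧ b = rc.2
      · rcases hab with ⟨ha, hb'⟩
        subst ha
        subst hb'
        simp [hrc]
      · have hne : ¬ ((a, b) = rc) := by
          rw [Prod.ext_iff]
          tauto
        simp only [List.mem_cons, hne, false_or, if_neg hab]
    · rw [if_neg (by simpa using hrc)]
      rw [ih m hb (fun p hp => hbd p (by simp [hp]))]
      congr 1
      funext a b
      by_cases hab : a = rc.1 ∧ b = rc.2
      · rcases hab with ⟨ha, hb'⟩
        subst ha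
        subst hb'
        simp [hrc]
      · have hne : ¬ ((a, b) = rc) := by
          rw [Prod.ext_iff]
          tauto
        simp only [List.mem_cons, hne, false_or]

lemma astep_true (sunk : List (List (Int × Int))) (hb : List (List Int))
    (mk : List (List (Option Int))) (s : List (Int × Int))
    (hg : s.all (fun rc => hget hb rc.1 rc.2 == 3) = true) :
    astep (sunk, hb, mk) s =
      (sunk ++ [s], s.foldl (fun hb rc => hset hb rc.1 rc.2 4) hb,
       (mark_around_cells s).foldl (fun mk rc =>
         if hget (s.foldl (fun hb rc => hset hb rc.1 rc.2 4) hb) rc.1 rc.2 == 0 then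
           mset mk rc.1 rc.2 (some 2) else mk) mk) := by
  simp only [astep, hg, if_true]

set_option maxHeartbeats 1000000 in
lemma invstep (sunk : List (List (Int × Int))) (hb : List (List Int)) (s : List (Int × Int))
    (hg : s.all (fun rc => hget hb rc.1 rc.2 == 3) = true) :
    (mark_around_cells s).foldl (fun mk rc =>
        if hget (s.foldl (fun hb rc => hset hb rc.1 rc.2 4) hb) rc.1 rc.2 == 0 then
          mset mk rc.1 rc.2 (some 2) else mk) (conc (inv sunk hb)) =
      conc (inv (sunk ++ [s]) (s.foldl (fun hb rc => hset hb rc.1 rc.2 4) hb)) := by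
  have h3 : ∀ rc ∈ s, hget hb rc.1 rc.2 = 3 := by
    intro rc h
    have := List.all_eq_true.mp hg rc h
    simpa using this
  have hzw := writes_zero s hb (fun rc h => by rw [h3 rc h]; omega)
  rw [markfold_conc (mark_around_cells s) (inv sunk hb)
      (s.foldl (fun hb rc => hset hb rc.1 rc.2 4) hb)
      (fun p hp => by
        have := (mem_mark_around s p).mp hp
        exact ⟨this.1, this.2.1, this.2.2.1, this.2.2.2.1⟩)]
  congr 1
  funext a b
  have hA : ((a, b) ∈ mark_around_cells s) ↔
      (0 ≤ a ∧ a < 10 ∧ 0 ≤ b ∧ b < 10 ∧ (a, b) ∉ s ∧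
        ∃ rc ∈ s, |a - rc.1| ≤ 1 ∧ |b - rc.2| ≤ 1) := mem_mark_around s (a, b)
  have hR : (ringedB (sunk ++ [s]) a b = true) ↔
      (ringedB sunk a b = true ∨ ((a, b) ∉ s ∧ ∃ rc ∈ s, |a - rc.1| ≤ 1 ∧ |b - rc.2| ≤ 1)) := by
    simp [ringedB, List.any_append, List.any_eq_true]
  have hz := hzw a b
  unfold inv
  simp only [hA, hR]
  split_ifs with h1 h2 h3 h4 h5
  · rfl
  · exact absurd ⟨⟨h1.1.1, h1.1.2.1, h1.1.2.2.1, h1.1.2.2.2.1⟩,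
      Or.inr ⟨h1.1.2.2.2.2.1, h1.1.2.2.2.2.2⟩, h1.2⟩ h2
  · rfl
  · exact absurd ⟨h3.1, Or.inl h3.2.1, hz.mpr h3.2.2⟩ h4
  · exfalso
    rcases h5 with ⟨hB, hOr, hz2⟩
    rcases hOr with hRs | hNE
    · exact h3 ⟨hB, hRs, hz.mp hz2⟩
    · exact h1 ⟨⟨hB.1, hB.2.1, hB.2.2.1, hB.2.2.2, hNE.1, hNE.2⟩, hz2⟩
  · rfl

lemma main_fold (ships : List (List (Int × Int))) :
    ∀ (sunk : List (List (Int × Int))) (hb : List (List Int)),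
    ships.foldl astep (sunk, hb, conc (inv sunk hb)) =
      ((ships.foldl bstep (sunk, hb)).1, (ships.foldl bstep (sunk, hb)).2,
       conc (inv (ships.foldl bstep (sunk, hb)).1 (ships.foldl bstep (sunk, hb)).2)) := by
  induction ships with
  | nil => intro sunk hb; simp
  | cons s rest ih =>
    intro sunk hb
    rw [List.foldl_cons, List.foldl_cons]
    by_cases hg : s.all (fun rc => hget hb rc.1 rc.2 == 3) = true
    · rw [astep_true sunk hb _ s hg, invstep sunk hb s hg]
      rw [show bstep (sunk, hb) s =
          (sunk ++ [s], s.foldl (fun hb rc => hset hb rc.1 rc.2 4) hb) from by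
        simp only [bstep, hg, if_true]]
      exact ih _ _
    · rw [show astep (sunk, hb, conc (inv sunk hb)) s = (sunk, hb, conc (inv sunk hb)) from by
        unfold astep
        rw [if_neg hg]]
      rw [show bstep (sunk, hb) s = (sunk, hb) from by
        unfold bstep
        rw [if_neg hg]]
      exact ih _ _

lemma init_conc (hb : List (List Int)) :
    (PySem.List.pyRange 0 10 1).map (fun _ => List.replicate 10 (none : Option Int)) =
      conc (inv ([] : List (List (Int × Int))) hb) := by
  unfold conc
  apply List.map_congr_left
  intro a _
  have h : ∀ b : Int, inv ([] : List (List (Int × Int))) hb a b = none := by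
    intro b
    simp [inv, ringedB]
  rw [List.map_congr_left (fun b _ => h b)]
  simp [List.map_const', PySem.List.length_pyRange_one]

lemma conc_inv_eq_mark (sunk : List (List (Int × Int))) (hb : List (List Int)) :
    conc (inv sunk hb) =
      (PySem.List.pyRange 0 10 1).map (fun rr =>
        (PySem.List.pyRange 0 10 1).map (fun cc =>
          if ringedB sunk rr cc && (hget hb rr cc == 0) then some (2 : Int) else none)) := by
  unfold conc
  apply List.map_congr_left
  intro rr hrr
  apply List.map_congr_left
  intro cc hcc
  have h1 := PySem.List.mem_pyRange_one.mp hrr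
  have h2 := PySem.List.mem_pyRange_one.mp hcc
  unfold inv
  have hiff : ((0 ≤ rr ∧ rr < 10 ∧ 0 ≤ cc ∧ cc < 10) ∧ ringedB sunk rr cc = true ∧
      hget hb rr cc = 0) ↔ ((ringedB sunk rr cc && (hget hb rr cc == 0)) = true) := by
    simp only [Bool.and_eq_true, beq_iff_eq]
    constructor
    · exact fun h => ⟨h.2.1, h.2.2⟩
    · exact fun h => ⟨⟨h1.1, h1.2, h2.1, h2.2⟩, h.1, h.2⟩
  exact if_congr hiff rfl rfl

-- ===== VERDICT (by name: the statement is the Claim_ definition above) =====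
theorem update_sunk_and_marks_spec : Claim_equal_update_sunk_and_marks := by
  unfold Claim_equal_update_sunk_and_marks
  intro board hits_board ships _ _
  unfold Spec_update_sunk_and_marks
  have hA : update_sunk_and_marks board hits_board ships =
      ((ships.foldl astep (([] : List (List (Int × Int))), hits_board,
          (PySem.List.pyRange 0 10 1).map (fun _ => List.replicate 10 (none : Option Int)))).1,
       (ships.foldl astep (([] : List (List (Int × Int))), hits_board,
          (PySem.List.pyRange 0 10 1).map (fun _ => List.replicate 10 (none : Option Int)))).2.2) := rfl
  have hB : update_sunk_and_marks_alt board hits_board ships =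
      ((ships.foldl bstep (([] : List (List (Int × Int))), hits_board)).1,
       (PySem.List.pyRange 0 10 1).map (fun rr => (PySem.List.pyRange 0 10 1).map (fun cc =>
         if ringedB (ships.foldl bstep (([] : List (List (Int × Int))), hits_board)).1 rr cc &&
             (hget (ships.foldl bstep (([] : List (List (Int × Int))), hits_board)).2 rr cc == 0)
           then some (2 : Int) else none))) := rfl
  rw [hA, hB, init_conc hits_board, main_fold ships ([] : List (List (Int × Int))) hits_board,
    ← conc_inv_eq_mark]
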